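-- pv_equiv track=rewrite | github.com/jeffjiaxixu/virtual-closet | splashscreen.py | linebreakItemName
-- ===== SOURCE A (Python) =====
-- def linebreakItemName(s):
--     spaceCounter = 0
--     for i in range(len(s)):
--         if s[i] == " ":
--             spaceCounter += 1
--         if spaceCounter == 4:
--             break
--     if spaceCounter < 4:
--         return s
--     else:
--         return s[:i] + "\n" + s[i:]
-- ===== SOURCE B (Python) =====
-- def linebreakItemName(s):
--     parts = s.split(" ")
--     if len(parts) - 1 < 4:
--         return s
--     return " ".join(parts[:4]) + "\n" + " " + " ".join(parts[4:])
-- ===== Notes on version B (the rewrite author's own statement) =====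
-- stated objective: idiomatic
-- what changed: B replaces A's character-by-character counting loop with a break by str.split on the single-space separator plus str.join, rebuilding the string with the newline inserted before the 4th space.
import Mathlib
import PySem

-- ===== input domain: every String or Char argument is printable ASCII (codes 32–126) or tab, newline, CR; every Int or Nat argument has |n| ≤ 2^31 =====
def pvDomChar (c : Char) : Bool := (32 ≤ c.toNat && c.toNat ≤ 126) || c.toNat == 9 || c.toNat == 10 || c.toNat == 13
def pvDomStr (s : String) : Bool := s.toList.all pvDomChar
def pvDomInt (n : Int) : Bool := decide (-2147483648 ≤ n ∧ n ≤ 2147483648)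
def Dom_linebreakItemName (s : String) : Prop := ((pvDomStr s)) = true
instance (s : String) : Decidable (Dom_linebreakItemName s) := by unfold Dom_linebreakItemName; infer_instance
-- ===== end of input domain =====

-- B rebuilds the string via str.split/str.join on the space separator instead of A's counting scan with a break; same value; a timing run measured B faster (C-level split/join vs a Python char loop).

-- ===== PORT A =====
-- the Python for-loop with `break`: walks the characters, i is the running index,
-- cnt the space counter; stops (returning the current i) the moment cnt reaches 4.
def lbLoopA : List Char → Nat → Nat → Nat × Nat
  | [], i, cnt => (i, cnt)
  | c :: rest, i, cnt =>
    let cnt' := if c = ' ' then cnt + 1 else cnt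
    if cnt' = 4 then (i, cnt') else lbLoopA rest (i + 1) cnt'

def linebreakItemName (s : String) : String :=
  let p := lbLoopA s.toList 0 0
  if p.2 < 4 then s
  -- s[:i] / s[i:] with 0 ≤ i < len(s): exactly List.take / List.drop on the characters
  else String.mk (s.toList.take p.1 ++ '\n' :: s.toList.drop p.1)

-- ===== PORT B =====
def linebreakItemName_alt (s : String) : String :=
  let parts := PySem.Chars.splitOn s.toList [' ']   -- s.split(" ")
  if parts.length - 1 < 4 then s
  else String.mk (PySem.Chars.join [' '] (parts.take 4) ++ '\n' :: ' ' ::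
                  PySem.Chars.join [' '] (parts.drop 4))

-- ===== PRECONDITION & SPEC =====
def Spec_linebreakItemName (s : String) (out : String) : Prop := out = linebreakItemName_alt s
instance (s : String) (out : String) : Decidable (Spec_linebreakItemName s out) := by unfold Spec_linebreakItemName; infer_instance

-- ===== CLAIM (what is proved, stated in full; the proofs are below) =====
def Claim_equal_linebreakItemName : Prop := ∀ (s : String), Dom_linebreakItemName s → Spec_linebreakItemName s (linebreakItemName s)

-- ===== LEMMAS AND PROOFS =====

/-- Reference single-char split on `' '`. -/
def lbSpl : List Char → List (List Char)
  | [] => [[]]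
  | c :: rest =>
    if c = ' ' then [] :: lbSpl rest
    else match lbSpl rest with
      | p :: ps => (c :: p) :: ps
      | [] => [[c]]

/-- Index of the m-th space (1-based), assuming there are at least m spaces. -/
def lbPos : Nat → List Char → Nat
  | _, [] => 0
  | m, c :: rest => if c = ' ' then (if m = 1 then 0 else 1 + lbPos (m - 1) rest)
                    else 1 + lbPos m rest

theorem lbSpl_ne_nil (cs : List Char) : lbSpl cs ≠ [] := by
  cases cs with
  | nil => simp [lbSpl]
  | cons c rest =>
    simp only [lbSpl]
    split
    · simp
    · cases h : lbSpl rest <;> simp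

theorem lbSpl_length (cs : List Char) : (lbSpl cs).length = cs.count ' ' + 1 := by
  induction cs with
  | nil => simp [lbSpl]
  | cons c rest ih =>
    simp only [lbSpl]
    by_cases h : c = ' '
    · simp [h, ih, List.count_cons]
    · cases hs : lbSpl rest with
      | nil => exact absurd hs (lbSpl_ne_nil rest)
      | cons p ps =>
        simp [h, hs, ← ih, List.count_cons, Ne.symm h]

theorem lb_splitOn_go (fuel : Nat) :
    ∀ (l cur : List Char) (acc : List (List Char)), l.length < fuel →
      PySem.Chars.splitOn.go [' '] fuel l cur acc
        = acc.reverse ++ (lbSpl l).modifyHead (cur.reverse ++ ·) := by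
  induction fuel with
  | zero => intro l cur acc h; omega
  | succ f ih =>
    intro l cur acc h
    cases l with
    | nil => simp [PySem.Chars.splitOn.go, lbSpl]
    | cons c rest =>
      simp only [List.length_cons] at h
      by_cases hc : c = ' '
      · have hpre : [' '].isPrefixOf (c :: rest) = true := by simp [hc, List.isPrefixOf]
        rw [PySem.Chars.splitOn.go, if_pos hpre]
        have hdrop : List.drop [' '].length (c :: rest) = rest := by simp
        rw [hdrop, ih _ _ _ (by omega)]
        cases hs : lbSpl rest with
        | nil => exact absurd hs (lbSpl_ne_nil rest)
        | cons p ps => simp [lbSpl, hc, hs]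
      · have hpre : [' '].isPrefixOf (c :: rest) = false := by
          simp [List.isPrefixOf, Ne.symm hc]
        rw [PySem.Chars.splitOn.go, if_neg (by simp [hpre])]
        rw [ih _ _ _ (by omega)]
        cases hs : lbSpl rest with
        | nil => exact absurd hs (lbSpl_ne_nil rest)
        | cons p ps => simp [lbSpl, hc, hs, List.append_assoc]

theorem lb_splitOn_eq (cs : List Char) : PySem.Chars.splitOn cs [' '] = lbSpl cs := by
  rw [PySem.Chars.splitOn, lb_splitOn_go (cs.length + 1) cs [] [] (by omega)]
  cases hs : lbSpl cs with
  | nil => exact absurd hs (lbSpl_ne_nil cs)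
  | cons p ps => simp

/-- `join` with a nonempty tail unfolds one step. -/
theorem lbJoin_cons (sep p : List Char) (ps : List (List Char)) (h : ps ≠ []) :
    PySem.Chars.join sep (p :: ps) = p ++ sep ++ PySem.Chars.join sep ps := by
  cases ps with
  | nil => exact absurd rfl h
  | cons q qs => exact PySem.Chars.join_cons_cons sep p q qs

theorem lb_join_spl (cs : List Char) : PySem.Chars.join [' '] (lbSpl cs) = cs := by
  induction cs with
  | nil => simp [lbSpl, PySem.Chars.join_singleton]
  | cons c rest ih =>
    by_cases hc : c = ' '
    · rw [show lbSpl (c :: rest) = [] :: lbSpl rest by simp [lbSpl, hc],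
        lbJoin_cons _ _ _ (lbSpl_ne_nil rest), ih]
      simp [hc]
    · cases hs : lbSpl rest with
      | nil => exact absurd hs (lbSpl_ne_nil rest)
      | cons p ps =>
        rw [hs] at ih
        rw [show lbSpl (c :: rest) = (c :: p) :: ps by simp [lbSpl, hc, hs]]
        cases ps with
        | nil =>
          rw [PySem.Chars.join_singleton] at ih ⊢
          rw [ih]
        | cons q qs =>
          rw [PySem.Chars.join_cons_cons] at ih ⊢
          rw [List.cons_append, List.cons_append, ih]

/-- Take/drop of the split at the m-th space, versus the character position of that space. -/
theorem lb_take_drop (cs : List Char) : ∀ m, 1 ≤ m → m ≤ cs.count ' ' →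
    PySem.Chars.join [' '] ((lbSpl cs).take m) = cs.take (lbPos m cs) ∧
    ' ' :: PySem.Chars.join [' '] ((lbSpl cs).drop m) = cs.drop (lbPos m cs) := by
  induction cs with
  | nil => intro m h1 h2; simp at h2; omega
  | cons c rest ih =>
    intro m h1 h2
    obtain ⟨k, rfl⟩ : ∃ k, m = k + 1 := ⟨m - 1, by omega⟩
    by_cases hc : c = ' '
    · rw [show lbSpl (c :: rest) = [] :: lbSpl rest by simp [lbSpl, hc]]
      by_cases hk : k = 0
      · subst hk
        refine ⟨by simp [lbPos, hc, PySem.Chars.join_singleton], ?_⟩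
        simp only [List.drop_succ_cons, List.drop_zero, lbPos, if_pos hc, if_pos rfl,
          lb_join_spl rest]
        simp [hc]
      · have h2' : k ≤ rest.count ' ' := by
          simp only [List.count_cons, hc, if_pos rfl] at h2
          simp at h2; omega
        obtain ⟨ht, hd⟩ := ih k (by omega) h2'
        have hpos : lbPos (k + 1) (c :: rest) = 1 + lbPos k rest := by
          rw [lbPos, if_pos hc, if_neg (by omega)]
          simp
        have htk : (lbSpl rest).take k ≠ [] := by
          cases hs : lbSpl rest with
          | nil => exact absurd hs (lbSpl_ne_nil rest)
          | cons p ps => simp; omega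
        constructor
        · rw [List.take_succ_cons, lbJoin_cons _ _ _ htk, ht, hpos,
            show 1 + lbPos k rest = lbPos k rest + 1 by omega, List.take_succ_cons]
          simp [hc]
        · rw [List.drop_succ_cons, hd, hpos,
            show 1 + lbPos k rest = lbPos k rest + 1 by omega, List.drop_succ_cons]
    · have hcnt : (c :: rest).count ' ' = rest.count ' ' := by
        simp [List.count_cons, eq_comm, hc]
      rw [hcnt] at h2
      obtain ⟨ht, hd⟩ := ih (k + 1) h1 h2
      cases hs : lbSpl rest with
      | nil => exact absurd hs (lbSpl_ne_nil rest)
      | cons p ps =>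
        rw [hs] at ht hd
        rw [show lbSpl (c :: rest) = (c :: p) :: ps by simp [lbSpl, hc, hs]]
        have hpos : lbPos (k + 1) (c :: rest) = (lbPos (k + 1) rest) + 1 := by
          rw [lbPos, if_neg hc]; omega
        constructor
        · rw [List.take_succ_cons, hpos, List.take_succ_cons]
          rw [List.take_succ_cons] at ht
          by_cases hps : ps.take k = []
          · rw [hps, PySem.Chars.join_singleton] at ht ⊢
            rw [ht]
          · rw [lbJoin_cons _ _ _ hps] at ht ⊢
            rw [List.cons_append, List.cons_append, ht]
        · rw [List.drop_succ_cons, hpos, List.drop_succ_cons]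
          rw [List.drop_succ_cons] at hd
          exact hd

/-- A's loop when fewer than the needed spaces remain: runs to the end. -/
theorem lbLoopA_low : ∀ (cs : List Char) (i cnt : Nat), cnt < 4 → cnt + cs.count ' ' < 4 →
    lbLoopA cs i cnt = (i + cs.length, cnt + cs.count ' ') := by
  intro cs
  induction cs with
  | nil => intro i cnt h1 h2; simp [lbLoopA]
  | cons c rest ih =>
    intro i cnt h1 h2
    by_cases hc : c = ' '
    · have hcnt : (c :: rest).count ' ' = rest.count ' ' + 1 := by simp [List.count_cons, hc]
      rw [hcnt] at h2
      have e : lbLoopA (c :: rest) i cnt = lbLoopA rest (i + 1) (cnt + 1) := by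
        simp [lbLoopA, hc]; omega
      rw [e, ih (i + 1) (cnt + 1) (by omega) (by omega)]
      simp [hcnt]; omega
    · have hcnt : (c :: rest).count ' ' = rest.count ' ' := by
        simp [List.count_cons, eq_comm, hc]
      rw [hcnt] at h2
      have e : lbLoopA (c :: rest) i cnt = lbLoopA rest (i + 1) cnt := by
        simp [lbLoopA, hc]; omega
      rw [e, ih (i + 1) cnt h1 (by omega)]
      simp [hcnt]; omega

/-- A's loop when enough spaces remain: stops at the (4-cnt)-th space of the rest. -/
theorem lbLoopA_hit : ∀ (cs : List Char) (i cnt : Nat), cnt < 4 → 4 ≤ cnt + cs.count ' ' →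
    lbLoopA cs i cnt = (i + lbPos (4 - cnt) cs, 4) := by
  intro cs
  induction cs with
  | nil => intro i cnt h1 h2; simp at h2; omega
  | cons c rest ih =>
    intro i cnt h1 h2
    by_cases hc : c = ' '
    · have hcnt : (c :: rest).count ' ' = rest.count ' ' + 1 := by simp [List.count_cons, hc]
      rw [hcnt] at h2
      by_cases h4 : cnt + 1 = 4
      · have e : lbLoopA (c :: rest) i cnt = (i, cnt + 1) := by
          simp [lbLoopA, hc, h4]
        rw [e, show lbPos (4 - cnt) (c :: rest) = 0 by
          rw [lbPos, if_pos hc, if_pos (by omega)]]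
        simp; omega
      · have e : lbLoopA (c :: rest) i cnt = lbLoopA rest (i + 1) (cnt + 1) := by
          simp [lbLoopA, hc]; omega
        rw [e, ih (i + 1) (cnt + 1) (by omega) (by omega),
          show lbPos (4 - cnt) (c :: rest) = 1 + lbPos (4 - cnt - 1) rest by
            rw [lbPos, if_pos hc, if_neg (by omega)],
          show 4 - (cnt + 1) = 4 - cnt - 1 by omega]
        rw [← Nat.add_assoc]
    · have hcnt : (c :: rest).count ' ' = rest.count ' ' := by
        simp [List.count_cons, eq_comm, hc]
      rw [hcnt] at h2
      have e : lbLoopA (c :: rest) i cnt = lbLoopA rest (i + 1) cnt := by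
        simp [lbLoopA, hc]; omega
      rw [e, ih (i + 1) cnt h1 (by omega),
        show lbPos (4 - cnt) (c :: rest) = 1 + lbPos (4 - cnt) rest by
          rw [lbPos, if_neg hc]]
      rw [← Nat.add_assoc]

-- ===== VERDICT (by name: the statement is the Claim_ definition above) =====
theorem linebreakItemName_spec : Claim_equal_linebreakItemName := by
  intro s _
  unfold Spec_linebreakItemName linebreakItemName linebreakItemName_alt
  rw [lb_splitOn_eq]
  set cs := s.toList with hcs
  by_cases hlow : cs.count ' ' < 4
  · rw [lbLoopA_low cs 0 0 (by omega) (by omega)]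
    have : (lbSpl cs).length - 1 < 4 := by rw [lbSpl_length]; omega
    simp [this, hlow]
  · push_neg at hlow
    rw [lbLoopA_hit cs 0 0 (by omega) (by omega)]
    have hlen : ¬ ((lbSpl cs).length - 1 < 4) := by rw [lbSpl_length]; omega
    obtain ⟨ht, hd⟩ := lb_take_drop cs 4 (by omega) hlow
    simp only [hlen, if_neg, if_false]
    have h4 : ¬ (4 : Nat) < 4 := by omega
    simp only [Nat.zero_add, if_neg h4]
    rw [ht, ← hd]
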